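-- pv_equiv track=rewrite | github.com/bandrw/kpfu | 2_course/oib/day03/main.py | str_to_segments
-- ===== SOURCE A (Python) =====
-- CHARS_IN_SEGMENT = 2
--
-- def str_to_segments(string):
-- 	segments = []
-- 	i = 0
-- 	while i < len(string):
-- 		tmp = string[i : i + CHARS_IN_SEGMENT]
-- 		j = 0
-- 		segment = 0
-- 		while j < CHARS_IN_SEGMENT:
-- 			if j < len(tmp):
-- 				segment += ord(tmp[j])
-- 			if j < CHARS_IN_SEGMENT - 1:
-- 				segment <<= 8
-- 			j += 1
-- 		segments.append(segment)
-- 		i += CHARS_IN_SEGMENT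
-- 	return segments
-- ===== SOURCE B (Python) =====
-- CHARS_IN_SEGMENT = 2
--
-- def str_to_segments(string):
-- 	segs = []
-- 	pending = None
-- 	for c in string:
-- 		if pending is None:
-- 			pending = ord(c) << 8
-- 		else:
-- 			segs.append(pending + ord(c))
-- 			pending = None
-- 	return segs + ([pending] if pending is not None else [])
-- ===== Notes on version B (the rewrite author's own statement) =====
-- stated objective: simpler
-- what changed: Replaces the index-stepping while loop with per-chunk string slicing and an inner 2-iteration accumulation loop by a single streaming pass over the characters that keeps an optional pending high byte and flushes it at the end.
import Mathlib
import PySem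

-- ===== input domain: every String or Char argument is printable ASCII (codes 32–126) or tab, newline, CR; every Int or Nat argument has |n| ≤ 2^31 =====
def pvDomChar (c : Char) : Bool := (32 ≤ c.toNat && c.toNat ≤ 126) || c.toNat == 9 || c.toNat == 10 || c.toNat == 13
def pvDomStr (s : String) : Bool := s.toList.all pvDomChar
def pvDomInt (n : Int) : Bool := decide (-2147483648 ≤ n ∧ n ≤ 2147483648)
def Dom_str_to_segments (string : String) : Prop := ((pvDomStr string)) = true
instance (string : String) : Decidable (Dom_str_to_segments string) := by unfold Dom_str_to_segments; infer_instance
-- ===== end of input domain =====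

-- B replaces A's index-stepping scan with inner 2-loop by one streaming pass holding an optional pending high byte (simpler decomposition, same cost).


-- ===== PORT A =====
-- inner 'while j < CHARS_IN_SEGMENT' loop of A (constant 2 iterations)
def pvA_inner (tmp : List Char) : Int :=
  (List.range 2).foldl
    (fun seg j =>
      let seg := if j < tmp.length then seg + (tmp.getD j ' ').toNat else seg
      if j < 2 - 1 then seg <<< 8 else seg)
    0

-- outer 'while i < len(string)' loop of A; tmp = string[i : i + 2]
def pvA_loop (cs : List Char) (i : Nat) : List Int :=
  if i < cs.length then
    pvA_inner (PySem.List.slice cs (some (i : Int)) (some ((i : Int) + 2))) :: pvA_loop cs (i + 2)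
  else []
termination_by cs.length - i

def str_to_segments (string : String) : List Int := pvA_loop string.toList 0

-- ===== PORT B =====
def pvB_step (acc : List Int × Option Int) (c : Char) : List Int × Option Int :=
  match acc.2 with
  | none => (acc.1, some (((c.toNat : Int)) <<< 8))
  | some v => (acc.1 ++ [v + (c.toNat : Int)], none)

def str_to_segments_alt (string : String) : List Int :=
  let r := string.toList.foldl pvB_step ([], none)
  r.1 ++ r.2.toList

-- ===== PRECONDITION & SPEC =====
def Spec_str_to_segments (string : String) (out : List Int) : Prop := out = str_to_segments_alt string
instance (string : String) (out : List Int) : Decidable (Spec_str_to_segments string out) := by unfold Spec_str_to_segments; infer_instance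

-- ===== CLAIM (what is proved, stated in full; the proofs are below) =====
def Claim_equal_str_to_segments : Prop := ∀ (string : String), Dom_str_to_segments string → Spec_str_to_segments string (str_to_segments string)

-- ===== LEMMAS AND PROOFS =====

-- canonical packing: both ports equal this two-at-a-time recursion
def pvPack : List Char → List Int
  | [] => []
  | [h] => [((h.toNat : Int)) <<< 8]
  | h :: l :: rest => ((((h.toNat : Int)) <<< 8) + (l.toNat : Int)) :: pvPack rest

lemma pvA_inner_one (c : Char) : pvA_inner [c] = ((c.toNat : Int)) <<< 8 := by
  simp [pvA_inner, List.range_succ]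

lemma pvA_inner_two (c d : Char) :
    pvA_inner [c, d] = (((c.toNat : Int)) <<< 8) + (d.toNat : Int) := by
  simp [pvA_inner, List.range_succ]

lemma pvA_loop_eq_pack (cs : List Char) (i : Nat) :
    pvA_loop cs i = pvPack (cs.drop i) := by
  rw [pvA_loop]
  split
  · next h =>
    have hs : PySem.List.slice cs (some (i : Int)) (some ((i : Int) + 2))
        = (cs.drop i).take 2 := by
      rw [PySem.List.slice_toNat cs (by omega) (by omega)]
      have h1 : ((i : Int)).toNat = i := by omega
      have h2 : (((i : Int) + 2)).toNat = i + 2 := by omega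
      rw [h1, h2]
      simp
    have hne : cs.drop i ≠ [] := by
      intro hnil
      have := List.drop_eq_nil_iff.mp hnil
      omega
    have hdd : cs.drop (i + 2) = (cs.drop i).drop 2 := by
      rw [List.drop_drop]
    have ih := pvA_loop_eq_pack cs (i + 2)
    rw [hs, ih, hdd]
    rcases hdi : cs.drop i with _ | ⟨c, _ | ⟨d, t⟩⟩
    · exact absurd hdi hne
    · simp [pvPack, pvA_inner_one]
    · simp [pvPack, pvA_inner_two]
  · next h =>
    have : cs.drop i = [] := List.drop_eq_nil_iff.mpr (by omega)
    rw [this, pvPack]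
termination_by cs.length - i

lemma pvB_loop_eq_pack (cs : List Char) (segs : List Int) :
    (let r := cs.foldl pvB_step (segs, none); r.1 ++ r.2.toList) = segs ++ pvPack cs := by
  match cs with
  | [] => simp [pvPack]
  | [h] => simp [pvPack, pvB_step]
  | h :: l :: t =>
    have ih := pvB_loop_eq_pack t (segs ++ [(((h.toNat : Int)) <<< 8) + (l.toNat : Int)])
    simp only [List.foldl_cons, pvB_step, pvPack]
    simpa using ih

-- ===== VERDICT (by name: the statement is the Claim_ definition above) =====
theorem str_to_segments_spec : Claim_equal_str_to_segments := by
  intro s _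
  unfold Spec_str_to_segments str_to_segments str_to_segments_alt
  rw [pvA_loop_eq_pack]
  simpa using (pvB_loop_eq_pack s.toList []).symm
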